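-- pv_equiv track=rewrite | github.com/dilllon/Progra1 | Clase 1/Guia de Ejercicios/TP 6/ej9.py | diasHastaFecha
-- ===== SOURCE A (Python) =====
-- dias30 = [4, 6, 9, 11]
--
-- dias31 = [1, 3, 5, 7, 8, 10, 12]
--
-- def diasHastaFecha(dd, mm, yyyy):
--     contd = dd
--     mes = 1
--     for mes in range(1, mm):
--         if mes in dias30:
--             contd += 30
--         elif mes in dias31:
--             contd += 31
--         else:
--             contd += 29 if esBisiesto(yyyy) == True else 28
--     return contd
--
-- def esBisiesto(yyyy):
--     if (yyyy % 4 == 0 and yyyy % 100 != 0) or (yyyy % 400 == 0):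
--         return True
--     else:
--         return False
-- ===== SOURCE B (Python) =====
-- dias31 = [1, 3, 5, 7, 8, 10, 12]
-- dias30 = [4, 6, 9, 11]
--
-- def esBisiesto(yyyy):
--     if (yyyy % 4 == 0 and yyyy % 100 != 0) or (yyyy % 400 == 0):
--         return True
--     else:
--         return False
--
-- def diasHastaFecha(dd, mm, yyyy):
--     feb = 29 if esBisiesto(yyyy) else 28
--     n = max(mm - 1, 0)          # completed months before the date
--     total = dd + feb * n
--     total += sum(31 - feb for m in dias31 if m <= n)
--     total += sum(30 - feb for m in dias30 if m <= n)
--     return total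
-- ===== Notes on version B (the rewrite author's own statement) =====
-- stated objective: faster
-- what changed: Replaces the per-month loop with a closed form: February-length baseline times the number of completed months plus fixed corrections for the 31- and 30-day months already passed.
import Mathlib
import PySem

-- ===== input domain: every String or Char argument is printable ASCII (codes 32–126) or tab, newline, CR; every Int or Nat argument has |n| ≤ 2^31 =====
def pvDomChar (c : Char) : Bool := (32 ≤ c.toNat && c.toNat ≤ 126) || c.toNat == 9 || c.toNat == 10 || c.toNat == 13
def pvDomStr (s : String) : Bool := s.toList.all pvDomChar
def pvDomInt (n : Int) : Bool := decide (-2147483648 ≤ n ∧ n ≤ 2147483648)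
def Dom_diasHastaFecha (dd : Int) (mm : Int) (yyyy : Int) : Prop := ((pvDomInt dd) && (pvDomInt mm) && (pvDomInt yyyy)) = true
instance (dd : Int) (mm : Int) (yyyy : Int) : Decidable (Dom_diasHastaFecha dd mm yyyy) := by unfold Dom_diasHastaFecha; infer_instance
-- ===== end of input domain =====

-- B replaces A's per-month loop with a closed form (February-length baseline times completed
-- months, plus fixed corrections for the passed 31/30-day months); objective: faster (O(1) vs O(mm)).

-- ===== PORT A =====
def dias30 : List Int := [4, 6, 9, 11]

def dias31 : List Int := [1, 3, 5, 7, 8, 10, 12]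

def esBisiesto (yyyy : Int) : Bool :=
  if (PySem.Int.mod yyyy 4 == 0 && PySem.Int.mod yyyy 100 != 0) || PySem.Int.mod yyyy 400 == 0 then
    true
  else
    false

def diasHastaFecha (dd : Int) (mm : Int) (yyyy : Int) : Int :=
  let contd := dd
  (PySem.List.pyRange 1 mm 1).foldl
    (fun contd mes =>
      if mes ∈ dias30 then contd + 30
      else if mes ∈ dias31 then contd + 31
      else contd + (if esBisiesto yyyy == true then 29 else 28))
    contd

-- ===== PORT B =====
def dias31B : List Int := [1, 3, 5, 7, 8, 10, 12]
def dias30B : List Int := [4, 6, 9, 11]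

def diasHastaFecha_alt (dd : Int) (mm : Int) (yyyy : Int) : Int :=
  let feb : Int := if esBisiesto yyyy then 29 else 28
  let n := max (mm - 1) 0          -- completed months before the date
  let total := dd + feb * n
  let total := total + ((dias31B.filter (fun m => m ≤ n)).map (fun _ => 31 - feb)).sum
  let total := total + ((dias30B.filter (fun m => m ≤ n)).map (fun _ => 30 - feb)).sum
  total

-- ===== PRECONDITION & SPEC =====
def Spec_diasHastaFecha (dd : Int) (mm : Int) (yyyy : Int) (out : Int) : Prop := out = diasHastaFecha_alt dd mm yyyy
instance (dd : Int) (mm : Int) (yyyy : Int) (out : Int) : Decidable (Spec_diasHastaFecha dd mm yyyy out) := by unfold Spec_diasHastaFecha; infer_instance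

-- ===== CLAIM (what is proved, stated in full; the proofs are below) =====
def Claim_equal_diasHastaFecha : Prop := ∀ (dd : Int) (mm : Int) (yyyy : Int), Dom_diasHastaFecha dd mm yyyy → Spec_diasHastaFecha dd mm yyyy (diasHastaFecha dd mm yyyy)

-- ===== LEMMAS AND PROOFS =====

-- one step of A's loop
def monthAdd (mes : Int) (yyyy : Int) : Int :=
  if mes ∈ dias30 then 30
  else if mes ∈ dias31 then 31
  else (if esBisiesto yyyy == true then 29 else 28)

theorem diasHastaFecha_succ (dd mm yyyy : Int) (h : 1 ≤ mm) :
    diasHastaFecha dd (mm + 1) yyyy = diasHastaFecha dd mm yyyy + monthAdd mm yyyy := by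
  simp only [diasHastaFecha, PySem.List.pyRange_one_succ_right h, List.foldl_append,
    List.foldl_cons, List.foldl_nil, monthAdd]
  split_ifs <;> simp_all

theorem monthAdd_big (mes yyyy : Int) (h : 13 ≤ mes) :
    monthAdd mes yyyy = (if esBisiesto yyyy then 29 else 28) := by
  have h30 : mes ∉ dias30 := by simp [dias30]; omega
  have h31 : mes ∉ dias31 := by simp [dias31]; omega
  simp [monthAdd, h30, h31]

theorem alt_big (dd mm yyyy : Int) (h : 13 ≤ mm) :
    diasHastaFecha_alt dd mm yyyy =
      dd + (if esBisiesto yyyy then 29 else 28) * (mm - 1)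
        + 7 * (31 - (if esBisiesto yyyy then 29 else 28))
        + 4 * (30 - (if esBisiesto yyyy then 29 else 28)) := by
  have hn : max (mm - 1) 0 = mm - 1 := by omega
  have h12 : (12 : Int) ≤ mm - 1 := by omega
  simp only [diasHastaFecha_alt, hn]
  have f31 : dias31B.filter (fun m => m ≤ mm - 1) = dias31B := by
    rw [List.filter_eq_self]
    intro a ha
    simp only [dias31B, List.mem_cons, List.not_mem_nil, or_false] at ha
    simp only [decide_eq_true_eq]
    omega
  have f30 : dias30B.filter (fun m => m ≤ mm - 1) = dias30B := by
    rw [List.filter_eq_self]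
    intro a ha
    simp only [dias30B, List.mem_cons, List.not_mem_nil, or_false] at ha
    simp only [decide_eq_true_eq]
    omega
  rw [f31, f30]
  cases esBisiesto yyyy <;> simp [dias31B, dias30B] <;> ring

theorem alt_succ (dd mm yyyy : Int) (h : 1 ≤ mm) :
    diasHastaFecha_alt dd (mm + 1) yyyy = diasHastaFecha_alt dd mm yyyy + monthAdd mm yyyy := by
  by_cases hbig : 13 ≤ mm
  · rw [alt_big dd (mm + 1) yyyy (by omega), alt_big dd mm yyyy hbig, monthAdd_big mm yyyy hbig]
    cases esBisiesto yyyy <;> simp <;> ring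
  · have hsmall : mm < 13 := by omega
    interval_cases mm <;>
      cases hb : esBisiesto yyyy <;>
        simp [diasHastaFecha_alt, monthAdd, dias30, dias31, dias30B, dias31B, List.filter, hb] <;> omega

theorem alt_base (dd mm yyyy : Int) (h : mm ≤ 1) : diasHastaFecha_alt dd mm yyyy = dd := by
  have hn : max (mm - 1) 0 = 0 := by omega
  have f31 : dias31B.filter (fun m => m ≤ (0 : Int)) = [] := by simp [dias31B]
  have f30 : dias30B.filter (fun m => m ≤ (0 : Int)) = [] := by simp [dias30B]
  simp [diasHastaFecha_alt, hn, f31, f30]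

theorem main_eq (dd mm yyyy : Int) :
    diasHastaFecha dd mm yyyy = diasHastaFecha_alt dd mm yyyy := by
  by_cases hle : mm ≤ 1
  · rw [alt_base dd mm yyyy hle]
    simp [diasHastaFecha, PySem.List.pyRange_one_eq_nil hle]
  · have H : ∀ n : Int, 1 ≤ n → diasHastaFecha dd n yyyy = diasHastaFecha_alt dd n yyyy := by
      intro n hn
      induction n, hn using Int.le_induction with
      | base =>
          rw [alt_base dd 1 yyyy le_rfl]
          simp [diasHastaFecha, PySem.List.pyRange_one_eq_nil le_rfl]
      | succ n hn ih =>
          rw [diasHastaFecha_succ dd n yyyy hn, alt_succ dd n yyyy hn, ih]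
    exact H mm (by omega)

-- ===== VERDICT (by name: the statement is the Claim_ definition above) =====
theorem diasHastaFecha_spec : Claim_equal_diasHastaFecha := by
  intro dd mm yyyy _
  exact main_eq dd mm yyyy
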